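-- pv_equiv track=rewrite | github.com/Himanshu072507/ai-ticket-analyzer-agent | app.py | auto_map
-- ===== SOURCE A (Python) =====
-- FIELD_SYNONYMS = {
--     "ticket_id": ["ticket id", "ticket number", "ticket no", "ticket #", "incident id",
--                   "incident number", "incident", "ref", "reference", "id", "case id",
--                   "case number"],
--     "category": ["category", "issue type", "type", "issue category", "ticket type"],
--     "description": ["description", "details", "explanation", "summary", "comment", "issue"],
--     "department": ["department", "team", "dept", "business unit", "sbu"],
--     "date": ["date", "created", "created at", "created on", "opened", "reported on", "timestamp"],
--     "priority": ["priority", "severity"],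
--     "status": ["status", "state"],
-- }
--
-- def auto_map(columns: list[str]) -> dict[str, str | None]:
--     """Pick the best column for each logical field by matching against synonyms."""
--     lowered = {c: c.strip().lower() for c in columns}
--     mapping: dict[str, str | None] = {}
--     for field, synonyms in FIELD_SYNONYMS.items():
--         # First, try exact matches
--         match = next(
--             (orig for orig, low in lowered.items() if any(s == low for s in synonyms)),
--             None,
--         )
--         # If no exact match, try substring matches
--         if match is None:
--             match = next(
--                 (orig for orig, low in lowered.items() if any(s in low for s in synonyms)),
--                 None,
--             )
--         mapping[field] = match
--     return mapping
-- ===== SOURCE B (Python) =====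
-- FIELD_SYNONYMS = {
--     "ticket_id": ["ticket id", "ticket number", "ticket no", "ticket #", "incident id",
--                   "incident number", "incident", "ref", "reference", "id", "case id",
--                   "case number"],
--     "category": ["category", "issue type", "type", "issue category", "ticket type"],
--     "description": ["description", "details", "explanation", "summary", "comment", "issue"],
--     "department": ["department", "team", "dept", "business unit", "sbu"],
--     "date": ["date", "created", "created at", "created on", "opened", "reported on", "timestamp"],
--     "priority": ["priority", "severity"],
--     "status": ["status", "state"],
-- }
--
--
-- def _priority(synonyms, low):
--     """2 = exact synonym, 1 = synonym is a substring, 0 = no match."""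
--     if any(s == low for s in synonyms):
--         return 2
--     if any(s in low for s in synonyms):
--         return 1
--     return 0
--
--
-- def auto_map(columns: list) -> dict:
--     """Single scoring pass per field: keep the first column with the highest priority."""
--     mapping = {}
--     for field, synonyms in FIELD_SYNONYMS.items():
--         best, best_p = None, 0
--         for c in columns:
--             p = _priority(synonyms, c.strip().lower())
--             if p > best_p:
--                 best, best_p = c, p
--         mapping[field] = best
--     return mapping
-- ===== Notes on version B (the rewrite author's own statement) =====
-- stated objective: alternative
-- what changed: Replaces A's per-field pair of scans (an exact-match scan over a precomputed lowered dict, then a substring scan) with a single scoring pass per field over the columns that assigns each column a priority (2 exact, 1 substring, 0 none) and keeps the first column with a strictly higher priority.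
import Mathlib
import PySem

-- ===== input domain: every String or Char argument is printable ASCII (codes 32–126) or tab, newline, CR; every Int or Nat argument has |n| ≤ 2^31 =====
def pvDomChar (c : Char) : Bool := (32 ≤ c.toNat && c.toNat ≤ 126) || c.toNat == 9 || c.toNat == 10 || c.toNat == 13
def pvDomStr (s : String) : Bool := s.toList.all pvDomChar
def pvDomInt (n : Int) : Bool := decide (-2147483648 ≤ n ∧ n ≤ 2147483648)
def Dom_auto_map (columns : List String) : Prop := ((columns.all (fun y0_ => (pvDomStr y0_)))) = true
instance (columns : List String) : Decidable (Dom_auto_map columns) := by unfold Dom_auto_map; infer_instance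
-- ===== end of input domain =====

-- B replaces A's two scans per field (exact-match scan over a precomputed lowered dict, then a
-- substring scan) with a single scoring pass per field over the columns (alternative algorithm).

-- shared module constant FIELD_SYNONYMS (data used by both Pythons)
def fieldSynonyms : List (String × List String) :=
  [("ticket_id", ["ticket id", "ticket number", "ticket no", "ticket #", "incident id",
                  "incident number", "incident", "ref", "reference", "id", "case id",
                  "case number"]),
   ("category", ["category", "issue type", "type", "issue category", "ticket type"]),
   ("description", ["description", "details", "explanation", "summary", "comment", "issue"]),
   ("department", ["department", "team", "dept", "business unit", "sbu"]),
   ("date", ["date", "created", "created at", "created on", "opened", "reported on", "timestamp"]),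
   ("priority", ["priority", "severity"]),
   ("status", ["status", "state"])]

-- c.strip().lower(), used by both Pythons
def normCol (c : String) : String := PySem.Str.lower (PySem.Str.strip c)

-- ===== PORT A =====
-- body of A's per-field loop: exact-match scan first, then the substring scan
def matchField (lowered : PySem.Dict String String) (syns : List String) : Option String :=
  let m0 : Option String :=
    (lowered.items.find? (fun p => syns.any (fun s => s == p.2))).map (·.1)
  match m0 with
  | none => (lowered.items.find? (fun p => syns.any (fun s => PySem.Str.isIn s p.2))).map (·.1)
  | some c => some c

def auto_map (columns : List String) : List (String × Option String) :=
  let lowered : PySem.Dict String String :=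
    columns.foldl (fun d c => d.insert c (normCol c)) PySem.Dict.empty
  (fieldSynonyms.foldl (fun m fs => m.insert fs.1 (matchField lowered fs.2))
    (PySem.Dict.empty : PySem.Dict String (Option String))).items

-- ===== PORT B =====
def prioB (synonyms : List String) (low : String) : Nat :=
  if synonyms.any (fun s => s == low) then 2
  else if synonyms.any (fun s => PySem.Str.isIn s low) then 1
  else 0

def bestB (columns : List String) (synonyms : List String) : Option String :=
  (columns.foldl (fun (st : Option String × Nat) c =>
      if st.2 < prioB synonyms (normCol c) then (some c, prioB synonyms (normCol c)) else st)
    (none, 0)).1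

def auto_map_alt (columns : List String) : List (String × Option String) :=
  fieldSynonyms.map (fun fs => (fs.1, bestB columns fs.2))

-- ===== PRECONDITION & SPEC =====
def Spec_auto_map (columns : List String) (out : List (String × Option String)) : Prop := out = auto_map_alt columns
instance (columns : List String) (out : List (String × Option String)) : Decidable (Spec_auto_map columns out) := by unfold Spec_auto_map; infer_instance

-- ===== CLAIM (what is proved, stated in full; the proofs are below) =====
def Claim_equal_auto_map : Prop := ∀ (columns : List String), Dom_auto_map columns → Spec_auto_map columns (auto_map columns)

-- ===== LEMMAS AND PROOFS =====

-- find? over a Set-building fold: first hit in s, else first hit in xs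
lemma find?_foldl_setAdd {α : Type} [DecidableEq α] (p : α → Bool) :
    ∀ (xs : List α) (s : PySem.Set α),
      (xs.foldl PySem.Set.add s).find? p = (s.find? p).or (xs.find? p) := by
  intro xs
  induction xs with
  | nil => intro s; simp
  | cons x rest ih =>
    intro s
    simp only [List.foldl_cons, ih]
    unfold PySem.Set.add
    split
    · rename_i hc
      have hx : x ∈ s := (PySem.Set.contains_iff s x).mp hc
      by_cases hpx : p x = true
      · have : (s.find? p).isSome := List.find?_isSome.mpr ⟨x, hx, hpx⟩
        rcases Option.isSome_iff_exists.mp this with ⟨a, ha⟩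
        simp [ha, hpx]
      · simp at hpx
        simp [List.find?_cons, hpx]
    · rw [List.find?_append]
      cases h : s.find? p <;> simp [List.find?_cons] <;> cases hpx : p x <;> simp [hpx]

-- the column→lowered dict A builds has items = pairs over the deduplicated columns
lemma build_items (f : String → String) :
    ∀ (cols : List String) (s : List String), s.Nodup →
      (cols.foldl (fun d c => d.insert c (f c))
        (PySem.Dict.mk (s.map (fun c => (c, f c))))).items
      = (cols.foldl PySem.Set.add s).map (fun c => (c, f c)) := by
  intro cols
  induction cols with
  | nil => intro s _; simp
  | cons c rest ih =>
    intro s hs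
    simp only [List.foldl_cons]
    have hkeys : (PySem.Dict.mk (s.map (fun c => (c, f c)))).keys = s := by
      simp [PySem.Dict.keys, Function.comp_def]
    have hins : (PySem.Dict.mk (s.map (fun c => (c, f c)))).insert c (f c)
        = PySem.Dict.mk ((PySem.Set.add s c).map (fun c => (c, f c))) := by
      apply PySem.Dict.ext
      by_cases hc : c ∈ s
      · have hcont : (PySem.Dict.mk (s.map (fun c => (c, f c)))).contains c = true := by
          rw [PySem.Dict.contains_iff_mem_keys, hkeys]; exact hc
        rw [PySem.Dict.items_insert_of_contains _ _ hcont]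
        have hadd : PySem.Set.add s c = s := by
          unfold PySem.Set.add
          simp
          exact hc
        rw [hadd]
        simp only [List.map_map]
        apply List.map_congr_left
        intro a _
        by_cases hac : a = c <;> simp [hac]
      · have hcont : (PySem.Dict.mk (s.map (fun c => (c, f c)))).contains c = false := by
          rw [Bool.eq_false_iff]
          intro h
          exact hc (by rw [PySem.Dict.contains_iff_mem_keys, hkeys] at h; exact h)
        rw [PySem.Dict.items_insert_of_not_contains _ _ hcont]
        have hadd : PySem.Set.add s c = s ++ [c] := by
          unfold PySem.Set.add
          have : PySem.Set.contains s c = false := by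
            rw [Bool.eq_false_iff]; intro h; exact hc ((PySem.Set.contains_iff s c).mp h)
          simp
          exact hc
        rw [hadd]
        simp
    rw [hins]
    have hnodup : (PySem.Set.add s c).Nodup := by
      unfold PySem.Set.add
      split
      · exact hs
      · rename_i h
        refine List.Nodup.append hs (List.nodup_singleton c) ?_
        intro a ha hb
        simp at hb; subst hb
        exact h ((PySem.Set.contains_iff s a).mpr ha ▸ rfl)
    exact ih (PySem.Set.add s c) hnodup

-- characterisation of B's scoring fold
lemma bestB_fold_spec (g : String → Nat) (hg : ∀ c, g c ≤ 2) :
    ∀ (cols : List String) (b : Option String) (p : Nat),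
      cols.foldl (fun st c => if st.2 < g c then (some c, g c) else st) (b, p)
      = if 2 ≤ p then (b, p)
        else match cols.find? (fun c => g c == 2) with
        | some c => (some c, 2)
        | none =>
          if 1 ≤ p then (b, p)
          else match cols.find? (fun c => g c != 0) with
            | some c => (some c, g c)
            | none => (b, p) := by
  intro cols
  induction cols with
  | nil => intro b p; by_cases h2 : 2 ≤ p <;> by_cases h1 : 1 ≤ p <;> simp [h2, h1]
  | cons c rest ih =>
    intro b p
    simp only [List.foldl_cons, List.find?_cons]
    have hgc := hg c
    by_cases h2 : 2 ≤ p
    · have : ¬ p < g c := by omega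
      simp only [this, ite_false, ih, if_pos h2]
    · rcases Nat.lt_or_ge (g c) 2 with hlt | hge
      · have he : (g c == 2) = false := by simp; omega
        simp only [he, cond_false]
        by_cases h1 : 1 ≤ p
        · have : ¬ p < g c := by omega
          simp only [this, ite_false, ih, if_neg h2, if_pos h1]
        · have hp0 : p = 0 := by omega
          subst hp0
          rcases Nat.eq_zero_or_pos (g c) with hz | hpos
          · have hz' : (g c != 0) = false := by simp [hz]
            simp [hz, ih, h2, hz']
          · have hg1 : g c = 1 := by omega
            have hne : (g c != 0) = true := by simp [hg1]
            simp only [hg1, Nat.zero_lt_one, ite_true, ih]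
            simp [hne, hg1]
      · have hgc2 : g c = 2 := by omega
        have : p < g c := by omega
        simp only [this, ite_true, ih, hgc2]
        have hp1 : p ≤ 1 := by omega
        simp [hp1, h2]

-- prioB bounded by 2
lemma prioB_le_two (syns : List String) (low : String) : prioB syns low ≤ 2 := by
  unfold prioB; split_ifs <;> omega

-- exact-match predicate of A = 'priority 2' predicate of B
lemma pred_exact_eq (syns : List String) :
    (fun c => prioB syns (normCol c) == 2) = (fun c => syns.any (fun s => s == normCol c)) := by
  funext c
  unfold prioB
  cases hany : syns.any (fun s => s == normCol c)
  · simp only [hany, Bool.false_eq_true, if_false]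
    split <;> simp
  · simp [hany]

-- substring predicate of A = 'priority ≠ 0' predicate of B (an exact match is a substring match)
lemma pred_sub_eq (syns : List String) :
    (fun c => prioB syns (normCol c) != 0)
    = (fun c => syns.any (fun s => PySem.Str.isIn s (normCol c))) := by
  funext c
  cases hany : syns.any (fun s => s == normCol c)
  · unfold prioB
    simp only [hany, Bool.false_eq_true, if_false]
    split
    · rename_i h; rw [h]; rfl
    · rename_i h
      rw [Bool.not_eq_true] at h
      rw [h]; rfl
  · rcases List.any_eq_true.mp hany with ⟨s, hs, he⟩
    have hse : s = normCol c := by simpa using he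
    have hsub : syns.any (fun s => PySem.Str.isIn s (normCol c)) = true := by
      refine List.any_eq_true.mpr ⟨s, hs, ?_⟩
      rw [hse]
      exact (PySem.Str.isIn_iff_infix _ _).mpr (List.infix_refl _)
    have h2 : prioB syns (normCol c) = 2 := by simp [prioB, hany]
    rw [h2, hsub]; rfl

-- per-field equality: A's two scans = B's scoring scan
lemma field_eq (cols : List String) (syns : List String) :
    matchField (cols.foldl (fun d c => d.insert c (normCol c)) PySem.Dict.empty) syns
    = bestB cols syns := by
  have hitems : (cols.foldl (fun d c => d.insert c (normCol c)) PySem.Dict.empty).items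
      = (cols.foldl PySem.Set.add []).map (fun c => (c, normCol c)) := by
    have h := build_items normCol cols [] List.nodup_nil
    simpa using h
  have hfind : ∀ (q : String × String → Bool),
      (cols.foldl (fun d c => d.insert c (normCol c)) PySem.Dict.empty).items.find? q
      = (cols.find? (fun c => q (c, normCol c))).map (fun c => (c, normCol c)) := by
    intro q
    rw [hitems, List.find?_map, find?_foldl_setAdd]
    simp [Function.comp_def]
  unfold matchField bestB
  rw [hfind, hfind, bestB_fold_spec (fun c => prioB syns (normCol c))
    (fun c => prioB_le_two syns (normCol c)), pred_exact_eq, pred_sub_eq]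
  cases h1 : cols.find? (fun c => syns.any (fun s => s == normCol c)) <;>
    cases h2 : cols.find? (fun c => syns.any (fun s => PySem.Str.isIn s (normCol c))) <;>
    simp [h1, h2]

-- ===== VERDICT (by name: the statement is the Claim_ definition above) =====
theorem auto_map_spec : Claim_equal_auto_map := by
  intro cols _
  unfold Spec_auto_map auto_map auto_map_alt
  rw [PySem.Dict.items_foldl_insert_fresh fieldSynonyms (fun fs => fs.1)
      (fun fs => matchField (cols.foldl (fun d c => d.insert c (normCol c)) PySem.Dict.empty) fs.2)
      PySem.Dict.empty
      (fun fs _ => by simp)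
      (by decide)]
  simp only [PySem.Dict.empty, PySem.Dict.items, List.nil_append]
  apply List.map_congr_left
  intro fs _
  exact congrArg (fun o => (fs.1, o)) (field_eq cols fs.2)
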